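-- pv_equiv track=rewrite | github.com/ks6573/SysControl | agent/core.py | prune_history
-- ===== SOURCE A (Python) =====
-- MAX_HISTORY_MESSAGES = 40  # ~20 user turns; keeps context within model limits
--
-- def prune_history(messages: list[dict], max_messages: int = MAX_HISTORY_MESSAGES) -> list[dict]:
--     """Trim history while preserving tool-call coherence.
--
--     Groups the history into user-anchored turn chunks, then drops the oldest
--     chunks until the total fits within the budget.
--     """
--     if len(messages) <= max_messages:
--         return messages
--
--     groups: list[list[dict]] = []
--     current: list[dict] = []
--     for msg in messages:
--         if msg["role"] == "user" and current:
--             groups.append(current)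
--             current = []
--         current.append(msg)
--     if current:
--         groups.append(current)
--
--     # Find first group index where cumulative tail count <= max_messages.
--     total = sum(len(g) for g in groups)
--     cutoff = 0
--     while cutoff < len(groups) and total > max_messages:
--         total -= len(groups[cutoff])
--         cutoff += 1
--
--     return [msg for group in groups[cutoff:] for msg in group]
-- ===== SOURCE B (Python) =====
-- MAX_HISTORY_MESSAGES = 40  # ~20 user turns; keeps context within model limits
--
-- def prune_history(messages: list[dict], max_messages: int = MAX_HISTORY_MESSAGES) -> list[dict]:
--     """Trim history while preserving tool-call coherence.
--
--     Scans forward from the first index that fits the budget and cuts at the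
--     first user message there (group boundaries are exactly the user messages).
--     """
--     if len(messages) <= max_messages:
--         return messages
--     for i in range(len(messages) - max_messages, len(messages)):
--         if messages[i]["role"] == "user":
--             return messages[i:]
--     return []
-- ===== Notes on version B (the rewrite author's own statement) =====
-- stated objective: simpler
-- what changed: Instead of building the group list, summing lengths, running a cutoff loop and flattening, B scans once from index len-max for the first user message and returns that suffix (or [] if none), since group boundaries are exactly the user messages.
-- outside the precondition, e.g. on prune_history([{'x': '1'}, {'x': '2'}], 1): A raises KeyError, B raises KeyError
import Mathlib
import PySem

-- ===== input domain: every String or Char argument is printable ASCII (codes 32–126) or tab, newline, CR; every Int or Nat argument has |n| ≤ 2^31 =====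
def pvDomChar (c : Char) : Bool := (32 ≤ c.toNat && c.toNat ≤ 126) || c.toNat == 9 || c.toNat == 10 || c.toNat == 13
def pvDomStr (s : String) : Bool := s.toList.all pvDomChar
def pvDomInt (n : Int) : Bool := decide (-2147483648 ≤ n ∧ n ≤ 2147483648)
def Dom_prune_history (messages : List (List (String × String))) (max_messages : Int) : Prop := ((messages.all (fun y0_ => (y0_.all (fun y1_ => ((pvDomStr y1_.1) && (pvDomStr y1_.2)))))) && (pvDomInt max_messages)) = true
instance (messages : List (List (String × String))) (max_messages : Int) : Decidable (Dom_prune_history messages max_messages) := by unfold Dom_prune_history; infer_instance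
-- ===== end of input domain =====

-- B replaces A's group-building, cumulative-count loop and flatten by a single
-- forward scan from index len-max for the first user message (same return value).

-- ===== PORT A =====
-- msg["role"] == "user" (Python raises KeyError when "role" is absent; Pre_ excludes that)
def pvIsUser (m : List (String × String)) : Bool :=
  (PySem.Dict.mk m).get? "role" == some "user"

-- the body of A's grouping for-loop, one message at a time
def pvStep (st : List (List (List (String × String))) × List (List (String × String)))
    (msg : List (String × String)) :
    List (List (List (String × String))) × List (List (String × String)) :=
  let (groups, current) :=
    if pvIsUser msg && !st.2.isEmpty then (st.1 ++ [st.2], ([] : List (List (String × String))))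
    else (st.1, st.2)
  (groups, current ++ [msg])

-- A's while loop 'while cutoff < len(groups) and total > max: total -= len(groups[cutoff]); cutoff += 1'
-- written as structural recursion over the groups from position cutoff
def pvCutLoop : List (List (List (String × String))) → Int → Int → Nat
  | [], _, _ => 0
  | g :: gs, total, maxm =>
      if total > maxm then pvCutLoop gs (total - (g.length : Int)) maxm + 1 else 0

def prune_history (messages : List (List (String × String))) (max_messages : Int) :
    List (List (String × String)) :=
  if (messages.length : Int) ≤ max_messages then messages
  else
    let st := messages.foldl pvStep ([], [])
    let groups := if st.2.isEmpty then st.1 else st.1 ++ [st.2]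
    let total : Int := ((groups.map List.length).sum : Nat)
    let cutoff := pvCutLoop groups total max_messages
    (groups.drop cutoff).flatten

-- ===== PORT B =====
-- B's for-loop over range(len-max, len): first i with messages[i]["role"] == "user" → messages[i:]
def pvScan (messages : List (List (String × String))) (i : Nat) :
    List (List (String × String)) :=
  if h : i < messages.length then
    if (PySem.Dict.mk messages[i]).get? "role" == some "user" then messages.drop i
    else pvScan messages (i + 1)
  else []
termination_by messages.length - i

def prune_history_alt (messages : List (List (String × String))) (max_messages : Int) :
    List (List (String × String)) :=
  if (messages.length : Int) ≤ max_messages then messages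
  else pvScan messages ((messages.length : Int) - max_messages).toNat

-- ===== PRECONDITION & SPEC =====
-- Pre_ excludes exactly the inputs where Python A raises KeyError: a history longer than
-- the budget containing a message without a "role" key.
def Pre_prune_history (messages : List (List (String × String))) (max_messages : Int) : Prop :=
  (messages.length : Int) ≤ max_messages ∨
    ∀ m ∈ messages, ((PySem.Dict.mk m).get? "role").isSome
instance (messages : List (List (String × String))) (max_messages : Int) : Decidable (Pre_prune_history messages max_messages) := by unfold Pre_prune_history; infer_instance

def pvWitness_prune_history : (List (List (String × String))) × Int :=
  ([[("role", "user"), ("content", "a")], [("role", "assistant"), ("content", "b")],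
    [("role", "user"), ("content", "c")]], 2)

def Spec_prune_history (messages : List (List (String × String))) (max_messages : Int) (out : List (List (String × String))) : Prop := out = prune_history_alt messages max_messages
instance (messages : List (List (String × String))) (max_messages : Int) (out : List (List (String × String))) : Decidable (Spec_prune_history messages max_messages out) := by unfold Spec_prune_history; infer_instance

-- ===== CLAIM (what is proved, stated in full; the proofs are below) =====
def Claim_equal_prune_history : Prop := ∀ (messages : List (List (String × String))) (max_messages : Int), Dom_prune_history messages max_messages → Pre_prune_history messages max_messages → Spec_prune_history messages max_messages (prune_history messages max_messages)

-- ===== LEMMAS AND PROOFS =====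

-- reference grouping: append msgs to the open group c, starting a new group at each user message
def groupsCont (c : List (List (String × String))) :
    List (List (String × String)) → List (List (List (String × String)))
  | [] => [c]
  | m :: rest =>
      if pvIsUser m then c :: groupsCont [m] rest else groupsCont (c ++ [m]) rest

theorem flatten_groupsCont (msgs c : List (List (String × String))) :
    (groupsCont c msgs).flatten = c ++ msgs := by
  induction msgs generalizing c with
  | nil => simp [groupsCont]
  | cons m rest ih =>
      simp only [groupsCont]
      split
      · simp [ih]
      · simp [ih]

theorem fold_eq (msgs : List (List (String × String)))
    (gs : List (List (List (String × String)))) (c : List (List (String × String)))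
    (hc : c ≠ []) :
    (let st := msgs.foldl pvStep (gs, c);
     if st.2.isEmpty then st.1 else st.1 ++ [st.2]) = gs ++ groupsCont c msgs := by
  induction msgs generalizing gs c with
  | nil => simp [groupsCont, hc]
  | cons m rest ih =>
      simp only [List.foldl_cons, groupsCont]
      by_cases hu : pvIsUser m
      · have : pvStep (gs, c) m = (gs ++ [c], [m]) := by
          simp [pvStep, hu, hc]
        rw [this, ih _ _ (by simp), if_pos hu]
        simp
      · have : pvStep (gs, c) m = (gs, c ++ [m]) := by
          simp [pvStep, hu]
        rw [this, ih _ _ (by simp), if_neg hu]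

theorem dropWhile_all_not (xs : List (List (String × String)))
    (hx : ∀ x ∈ xs, pvIsUser x = false) :
    xs.dropWhile (fun m => !pvIsUser m) = [] := by
  rw [List.dropWhile_eq_nil_iff]
  intro x hxm; simp [hx x hxm]

theorem dropWhile_prefix_not (xs ys : List (List (String × String)))
    (m : List (String × String))
    (hx : ∀ x ∈ xs, pvIsUser x = false) (hm : pvIsUser m = true) :
    (xs ++ m :: ys).dropWhile (fun m => !pvIsUser m) = m :: ys := by
  induction xs with
  | nil => simp [hm]
  | cons x xs ih =>
      have := hx x (by simp)
      simp only [List.cons_append, List.dropWhile]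
      simp [this, ih (fun y hy => hx y (by simp [hy]))]

theorem mem_drop_tail {c : List (List (String × String))} {x : List (String × String)}
    {t : Nat} (ht : 1 ≤ t) (hx : x ∈ c.drop t) : x ∈ c.drop 1 := by
  have : c.drop t = (c.drop 1).drop (t - 1) := by
    rw [List.drop_drop]; congr 1; omega
  rw [this] at hx
  exact List.mem_of_mem_drop hx

theorem cut_main (msgs : List (List (String × String))) :
    ∀ (c : List (List (String × String))) (maxm : Int), c ≠ [] →
    (∀ x ∈ c.drop 1, pvIsUser x = false) →
    ((groupsCont c msgs).drop
        (pvCutLoop (groupsCont c msgs) ((c.length + msgs.length : Nat) : Int) maxm)).flatten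
      = if ((c.length + msgs.length : Nat) : Int) ≤ maxm then c ++ msgs
        else ((c ++ msgs).drop (((c.length + msgs.length : Nat) : Int) - maxm).toNat).dropWhile
            (fun m => !pvIsUser m) := by
  induction msgs with
  | nil =>
      intro c maxm hc htail
      simp only [groupsCont, List.length_nil, Nat.add_zero, List.append_nil]
      by_cases hle : ((c.length : Nat) : Int) ≤ maxm
      · simp [pvCutLoop, hle, not_lt.mpr hle]
      · have hgt : ((c.length : Nat) : Int) > maxm := by omega
        have ht1 : 1 ≤ (((c.length : Nat) : Int) - maxm).toNat := by omega
        rw [if_neg hle]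
        simp only [pvCutLoop, if_pos hgt]
        simp only [List.drop_succ_cons, List.drop_nil, List.flatten_nil]
        exact (dropWhile_all_not _ (fun x hx => htail x (mem_drop_tail ht1 hx))).symm
  | cons m rest ih =>
      intro c maxm hc htail
      by_cases hu : pvIsUser m
      · simp only [groupsCont, if_pos hu]
        by_cases hle : ((c.length + (m :: rest).length : Nat) : Int) ≤ maxm
        · have : ¬ (((c.length + (m :: rest).length : Nat) : Int) > maxm) := by omega
          simp only [pvCutLoop, if_neg this, List.drop_zero, if_pos hle]
          simp [List.flatten_cons, flatten_groupsCont]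
        · have hgt : ((c.length + (m :: rest).length : Nat) : Int) > maxm := by omega
          simp only [pvCutLoop, if_pos hgt, List.drop_succ_cons, if_neg hle]
          have harith : ((c.length + (m :: rest).length : Nat) : Int) - (c.length : Int)
              = (((1 : Nat) + rest.length : Nat) : Int) := by
            simp only [List.length_cons]; push_cast; ring
          rw [harith]
          have hmain := ih [m] maxm (by simp) (by simp)
          norm_num at hmain
          simp only [List.length_cons] at hle ⊢
          push_cast at hle ⊢
          rw [hmain]
          by_cases hle' : 1 + (rest.length : Int) ≤ maxm
          · rw [if_pos hle']
            have ht : ((c.length : Int) + ((rest.length : Int) + 1) - maxm).toNat ≤ c.length := by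
              omega
            have ht1 : 1 ≤ ((c.length : Int) + ((rest.length : Int) + 1) - maxm).toNat := by
              omega
            rw [List.drop_append,
              (show ((c.length : Int) + ((rest.length : Int) + 1) - maxm).toNat - c.length = 0 by
                omega),
              List.drop_zero]
            exact (dropWhile_prefix_not _ _ _
              (fun x hx => htail x (mem_drop_tail ht1 hx)) hu).symm
          · rw [if_neg hle']
            rw [(show ((c.length : Int) + ((rest.length : Int) + 1) - maxm).toNat
                  = c.length + (1 + (rest.length : Int) - maxm).toNat by omega),
              List.drop_append,
              List.drop_eq_nil_of_le (Nat.le_add_right c.length _),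
              (show c.length + (1 + (rest.length : Int) - maxm).toNat - c.length
                  = (1 + (rest.length : Int) - maxm).toNat by omega),
              List.nil_append]
      · simp only [groupsCont, if_neg hu]
        have := ih (c ++ [m]) maxm (by simp) (by
          intro x hx
          rcases List.mem_append.mp (by
            have h1 : (c ++ [m]).drop 1 = c.drop 1 ++ [m] := by
              cases c with
              | nil => exact absurd rfl hc
              | cons a as => simp
            rw [h1] at hx; exact hx) with h | h
          · exact htail x h
          · simp at h; subst h; simpa using hu)
        have hlen : (c ++ [m]).length + rest.length = c.length + (m :: rest).length := by
          simp; omega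
        rw [hlen] at this
        rw [this]
        simp

-- pvScan computes dropWhile-not-user of the suffix
theorem scan_eq (messages : List (List (String × String))) (i : Nat) :
    pvScan messages i = (messages.drop i).dropWhile (fun m => !pvIsUser m) := by
  by_cases h : i < messages.length
  · rw [pvScan, dif_pos h]
    have hd : messages.drop i = messages[i] :: messages.drop (i + 1) :=
      List.drop_eq_getElem_cons h
    rw [hd]
    by_cases hu : (PySem.Dict.mk messages[i]).get? "role" == some "user"
    · simp only [if_pos hu, List.dropWhile]
      simp [pvIsUser, hu]
    · simp only [if_neg hu, List.dropWhile]
      have : pvIsUser messages[i] = false := by simpa [pvIsUser] using hu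
      simp only [this, Bool.not_false]
      exact scan_eq messages (i + 1)
  · rw [pvScan, dif_neg h]
    rw [List.drop_eq_nil_of_le (by omega), List.dropWhile_nil]
termination_by messages.length - i

-- ===== VERDICT (by name: the statement is the Claim_ definition above) =====
theorem prune_history_spec : Claim_equal_prune_history := by
  intro messages max_messages _ _
  unfold Spec_prune_history prune_history prune_history_alt
  by_cases hle : (messages.length : Int) ≤ max_messages
  · simp [hle]
  · rw [if_neg hle, if_neg hle]
    cases messages with
    | nil => simp at hle; rw [pvScan]; simp [pvCutLoop]
    | cons m rest =>
        have hstep : pvStep ([], ([] : List (List (String × String)))) m = ([], [m]) := by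
          simp [pvStep]
        have hfold := fold_eq rest [] [m] (by simp)
        simp only [List.nil_append] at hfold
        simp only [List.foldl_cons, hstep, hfold]
        have htot : (((groupsCont [m] rest).map List.length).sum : Int)
            = ((([m].length + rest.length : Nat)) : Int) := by
          rw [← List.length_flatten, flatten_groupsCont]
          simp
          omega
        rw [htot, cut_main rest [m] max_messages (by simp) (by simp),
          if_neg (by simp only [List.length_cons] at hle ⊢; push_cast at hle ⊢; omega)]
        rw [scan_eq]
        simp only [List.singleton_append, List.length_cons]
        rw [show (([].length + 1 + rest.length : Nat) : Int) = ((rest.length + 1 : Nat) : Int) by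
          norm_num; ring]
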